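-- pv_equiv track=rewrite | github.com/mhaythornthwaite/Python-Zero-to-Mastery-Course | 17_Scripting/Password_Checker/check_password.py | pwned_api_str_to_li
-- ===== SOURCE A (Python) =====
-- def pwned_api_str_to_li(pwned_data):
--     raw_hash_list = pwned_data.split(':')
--
--     proc_hash_list = []
--
--     for i in raw_hash_list:
--         mini_li = i.split('\r\n')
--         for j in mini_li:
--             proc_hash_list.append(j)
--
--     return proc_hash_list
-- ===== SOURCE B (Python) =====
-- def pwned_api_str_to_li(pwned_data):
--     # Single left-to-right scan: emit a token at each ':' or '\r\n' delimiter,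
--     # instead of splitting on ':' and then re-splitting every piece on '\r\n'.
--     tokens = []
--     cur = []
--     i = 0
--     n = len(pwned_data)
--     while i < n:
--         c = pwned_data[i]
--         if c == ':':
--             tokens.append(''.join(cur))
--             cur = []
--             i += 1
--         elif c == '\r' and i + 1 < n and pwned_data[i + 1] == '\n':
--             tokens.append(''.join(cur))
--             cur = []
--             i += 2
--         else:
--             cur.append(c)
--             i += 1
--     tokens.append(''.join(cur))
--     return tokens
-- ===== Notes on version B (the rewrite author's own statement) =====
-- stated objective: alternative
-- what changed: Replaces the nested split-on-':' then split-on-'\r\n' passes with one left-to-right scan that emits a token at each ':' or '\r\n' delimiter.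
import Mathlib
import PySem

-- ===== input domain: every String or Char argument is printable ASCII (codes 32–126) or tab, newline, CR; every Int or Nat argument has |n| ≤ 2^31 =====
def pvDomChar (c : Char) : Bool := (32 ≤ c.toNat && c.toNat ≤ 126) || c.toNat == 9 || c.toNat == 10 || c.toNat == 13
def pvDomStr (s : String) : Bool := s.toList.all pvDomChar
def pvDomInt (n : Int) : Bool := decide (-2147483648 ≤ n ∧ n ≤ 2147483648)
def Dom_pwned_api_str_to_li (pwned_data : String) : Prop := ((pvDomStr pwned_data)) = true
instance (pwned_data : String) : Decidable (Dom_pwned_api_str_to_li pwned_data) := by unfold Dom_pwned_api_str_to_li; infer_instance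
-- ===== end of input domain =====

-- B replaces A's nested split-on-':' / split-on-'\r\n' passes with one left-to-right
-- scan emitting a token at each ':' or '\r\n' delimiter (alternative decomposition, same cost).

-- ===== PORT A =====
-- Literal transliteration of A: split on ':', then for each piece split on '\r\n'
-- and append the sub-pieces one by one.
def pwned_api_str_to_li (pwned_data : String) : List String :=
  let raw_hash_list := PySem.Chars.splitOn pwned_data.toList [':']
  let proc_hash_list :=
    raw_hash_list.foldl (fun acc i =>
      (PySem.Chars.splitOn i ['\r', '\n']).foldl (fun acc2 j => acc2 ++ [j]) acc) []
  proc_hash_list.map String.ofList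

-- ===== PORT B =====
-- B's single scan: `cur` is the token built so far; a ':' or a '\r\n' pair ends it.
def pvScanB : List Char → List Char → List (List Char)
  | [], cur => [cur]
  | c :: rest, cur =>
    if c = ':' then cur :: pvScanB rest []
    else if c = '\r' ∧ rest.head? = some '\n' then cur :: pvScanB rest.tail []
    else pvScanB rest (cur ++ [c])
termination_by l _ => l.length
decreasing_by all_goals (simp; try omega)

def pwned_api_str_to_li_alt (pwned_data : String) : List String :=
  (pvScanB pwned_data.toList []).map String.ofList

-- ===== PRECONDITION & SPEC =====
def Spec_pwned_api_str_to_li (pwned_data : String) (out : List String) : Prop := out = pwned_api_str_to_li_alt pwned_data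
instance (pwned_data : String) (out : List String) : Decidable (Spec_pwned_api_str_to_li pwned_data out) := by unfold Spec_pwned_api_str_to_li; infer_instance

-- ===== CLAIM (what is proved, stated in full; the proofs are below) =====
def Claim_equal_pwned_api_str_to_li : Prop := ∀ (pwned_data : String), Dom_pwned_api_str_to_li pwned_data → Spec_pwned_api_str_to_li pwned_data (pwned_api_str_to_li pwned_data)

-- ===== LEMMAS AND PROOFS =====

/-- Apply `f` to the head of a list only. -/
def pvMapHead (f : List Char → List Char) : List (List Char) → List (List Char)
  | [] => []
  | t :: ts => f t :: ts

/-- Fuel-free, accumulator-free spec of `PySem.Chars.splitOn` (for nonempty `sep`). -/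
def pvSp (sep : List Char) : List Char → List (List Char)
  | [] => [[]]
  | c :: rest =>
    if sep.isPrefixOf (c :: rest) then [] :: pvSp sep (rest.drop (sep.length - 1))
    else pvMapHead (c :: ·) (pvSp sep rest)
termination_by l => l.length
decreasing_by all_goals (simp; try omega)

/-- Accumulator-free spec of `pvScanB`: split on ':' or '\r\n' in one pass. -/
def pvSp2 : List Char → List (List Char)
  | [] => [[]]
  | c :: rest =>
    if c = ':' then [] :: pvSp2 rest
    else if c = '\r' ∧ rest.head? = some '\n' then [] :: pvSp2 rest.tail
    else pvMapHead (c :: ·) (pvSp2 rest)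
termination_by l => l.length
decreasing_by all_goals (simp; try omega)

theorem pvMapHead_id (xs : List (List Char)) : pvMapHead (fun t => t) xs = xs := by
  cases xs <;> simp [pvMapHead]

theorem pvSp_ne_nil (sep l : List Char) : pvSp sep l ≠ [] := by
  induction l using pvSp.induct sep with
  | case1 => simp [pvSp]
  | case2 c rest h ih => simp [pvSp, h]
  | case3 c rest h ih =>
    simp only [pvSp, if_neg h]
    rcases hs : pvSp sep rest with _ | ⟨t, ts⟩
    · exact absurd hs ih
    · simp [pvMapHead]

theorem pvSp2_ne_nil (l : List Char) : pvSp2 l ≠ [] := by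
  induction l using pvSp2.induct with
  | case1 => simp [pvSp2]
  | case2 rest ih => simp [pvSp2]
  | case3 c rest h h2 ih => simp [pvSp2, h2]
  | case4 c rest h h2 ih =>
    simp only [pvSp2, if_neg h, if_neg h2]
    rcases hs : pvSp2 rest with _ | ⟨t, ts⟩
    · exact absurd hs ih
    · simp [pvMapHead]

/-- The head piece produced by `pvSp` is a prefix of the input. -/
theorem pvSp_head_prefix (sep : List Char) (l t : List Char) (ts : List (List Char))
    (h : pvSp sep l = t :: ts) : t <+: l := by
  induction l using pvSp.induct sep generalizing t ts with
  | case1 =>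
    simp [pvSp] at h
    rcases h with ⟨h1, -⟩
    subst h1
    exact List.nil_prefix
  | case2 c rest hp ih =>
    simp [pvSp, hp] at h
    rcases h with ⟨h1, -⟩
    subst h1
    exact List.nil_prefix
  | case3 c rest hp ih =>
    simp only [pvSp, if_neg hp] at h
    rcases hs : pvSp sep rest with _ | ⟨u, us⟩
    · exact absurd hs (pvSp_ne_nil sep rest)
    · rw [hs] at h
      simp [pvMapHead] at h
      rcases h with ⟨h1, rfl⟩
      rw [← h1]
      exact List.cons_prefix_cons.mpr ⟨rfl, ih u us hs⟩

/-- `splitOn.go` computed in terms of `pvSp`. -/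
theorem pvGo_eq (sep : List Char) (hsep : 1 ≤ sep.length) :
    ∀ fuel l cur acc, l.length < fuel →
      PySem.Chars.splitOn.go sep fuel l cur acc
        = acc.reverse ++ pvMapHead (fun t => cur.reverse ++ t) (pvSp sep l) := by
  intro fuel
  induction fuel with
  | zero => intro l cur acc h; omega
  | succ fuel ih =>
    intro l cur acc h
    match l with
    | [] => simp [PySem.Chars.splitOn.go, pvSp, pvMapHead]
    | c :: rest =>
      by_cases hp : sep.isPrefixOf (c :: rest)
      · have hlen : (List.drop sep.length (c :: rest)).length < fuel := by
          simp only [List.length_drop, List.length_cons]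
          simp only [List.length_cons] at h
          omega
        have hdrop : List.drop sep.length (c :: rest) = rest.drop (sep.length - 1) := by
          rcases Nat.exists_eq_add_of_le hsep with ⟨k, hk⟩
          simp [hk, Nat.add_comm, List.drop_succ_cons]
        simp only [PySem.Chars.splitOn.go, hp, if_true]
        rw [ih _ _ _ hlen, hdrop]
        simp only [pvSp, if_pos hp]
        rcases pvSp sep (rest.drop (sep.length - 1)) with _ | ⟨t, ts⟩
        · simp [pvMapHead]
        · simp [pvMapHead]
      · have hlen : rest.length < fuel := by
          simp only [List.length_cons] at h; omega
        simp only [PySem.Chars.splitOn.go, hp, if_false, Bool.false_eq_true]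
        rw [ih _ _ _ hlen]
        simp only [pvSp, if_neg hp]
        rcases hs : pvSp sep rest with _ | ⟨t, ts⟩
        · exact absurd hs (pvSp_ne_nil sep rest)
        · simp [pvMapHead, List.append_assoc]

theorem pvSplitOn_eq (l sep : List Char) (hsep : 1 ≤ sep.length) :
    PySem.Chars.splitOn l sep = pvSp sep l := by
  unfold PySem.Chars.splitOn
  rw [pvGo_eq sep hsep (l.length + 1) l [] [] (by omega)]
  simp [pvMapHead_id]

theorem pvScanB_eq (l cur : List Char) :
    pvScanB l cur = pvMapHead (fun t => cur ++ t) (pvSp2 l) := by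
  induction l using pvSp2.induct generalizing cur with
  | case1 => simp [pvScanB, pvSp2, pvMapHead]
  | case2 rest ih =>
    simp [pvScanB, pvSp2, pvMapHead, ih]
    rcases pvSp2 rest with _ | ⟨t, ts⟩ <;> rfl
  | case3 c rest h h2 ih =>
    simp [pvScanB, pvSp2, h2, pvMapHead, ih]
    rcases pvSp2 rest.tail with _ | ⟨t, ts⟩ <;> rfl
  | case4 c rest h h2 ih =>
    simp only [pvScanB, pvSp2, if_neg h, if_neg h2]
    rw [ih]
    rcases hs : pvSp2 rest with _ | ⟨t, ts⟩
    · exact absurd hs (pvSp2_ne_nil rest)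
    · simp [pvMapHead]

/-- Main lemma: splitting on ':' and re-splitting every piece on '\r\n'
    equals the one-pass split on either delimiter. -/
theorem pvFlat (s : List Char) :
    (pvSp [':'] s).flatMap (fun t => pvSp ['\r', '\n'] t) = pvSp2 s := by
  induction s using pvSp2.induct with
  | case1 => simp [pvSp, pvSp2]
  | case2 rest ih =>
    have hp : List.isPrefixOf [':'] (':' :: rest) = true := by
      simp [List.isPrefixOf]
    conv_lhs => rw [pvSp, if_pos hp]
    simp only [pvSp2]
    simp [pvSp, ih]
  | case3 c rest h h2 ih =>
    obtain ⟨rfl, hh⟩ := h2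
    rcases rest with _ | ⟨d, rest'⟩
    · simp at hh
    · simp only [List.head?_cons, Option.some.injEq] at hh
      subst hh
      simp only [List.tail_cons] at ih
      have hA : pvSp [':'] ('\r' :: '\n' :: rest')
          = pvMapHead (fun x => '\r' :: '\n' :: x) (pvSp [':'] rest') := by
        rw [pvSp, if_neg (by intro hx; simp [List.isPrefixOf] at hx)]
        rw [pvSp, if_neg (by intro hx; simp [List.isPrefixOf] at hx)]
        rcases hs : pvSp [':'] rest' with _ | ⟨t, ts⟩
        · exact absurd hs (pvSp_ne_nil _ _)
        · simp [pvMapHead]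
      have hr : pvSp2 ('\r' :: '\n' :: rest') = [] :: pvSp2 rest' := by
        rw [pvSp2, if_neg (by decide)]
        rw [if_pos (show ('\r' : Char) = '\r' ∧ ('\n' :: rest').head? = some '\n' from ⟨rfl, rfl⟩)]
        simp
      rw [hr, ← ih]
      rcases hs : pvSp [':'] rest' with _ | ⟨t, ts⟩
      · exact absurd hs (pvSp_ne_nil _ _)
      · rw [hA, hs]
        simp only [pvMapHead, List.flatMap_cons]
        have hcr : pvSp ['\r', '\n'] ('\r' :: '\n' :: t) = [] :: pvSp ['\r', '\n'] t := by
          rw [pvSp, if_pos (by simp [List.isPrefixOf])]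
          simp
        rw [hcr]
        simp
  | case4 c rest h h2 ih =>
    have hc : List.isPrefixOf [':'] (c :: rest) = false := by
      simp [List.isPrefixOf]; exact fun hx => h hx.symm
    conv_lhs => rw [pvSp]
    rw [if_neg (by simp [hc])]
    rcases hs : pvSp [':'] rest with _ | ⟨t, ts⟩
    · exact absurd hs (pvSp_ne_nil [':'] rest)
    · have hcrlf : List.isPrefixOf ['\r', '\n'] (c :: t) = false := by
        by_cases hcr : c = '\r'
        · subst hcr
          rcases ht : t with _ | ⟨e, t'⟩
          · decide
          · by_cases he : e = '\n'
            · exfalso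
              subst he
              have := pvSp_head_prefix [':'] rest t ts hs
              rw [ht] at this
              rcases this with ⟨z, hz⟩
              rw [← hz] at h2
              simp at h2
            · simp [List.isPrefixOf]; exact fun hx => he hx.symm
        · simp [List.isPrefixOf]; exact fun hx => absurd hx.symm hcr
      rcases hu : pvSp ['\r', '\n'] t with _ | ⟨u, us⟩
      · exact absurd hu (pvSp_ne_nil _ t)
      · simp only [pvMapHead, List.flatMap_cons]
        conv_lhs => rw [pvSp]
        rw [if_neg (by simp [hcrlf]), hu]
        simp only [pvSp2, if_neg h, if_neg h2]
        rw [← ih, hs]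
        simp only [List.flatMap_cons, hu, pvMapHead]
        simp
  
-- ===== VERDICT (by name: the statement is the Claim_ definition above) =====
theorem pwned_api_str_to_li_spec : Claim_equal_pwned_api_str_to_li := by
  intro p _hd
  unfold Spec_pwned_api_str_to_li pwned_api_str_to_li pwned_api_str_to_li_alt
  simp only [PySem.List.foldl_append_singleton, PySem.List.foldl_append_eq_flatMap,
    List.nil_append]
  have hinner : ∀ i, PySem.Chars.splitOn i ['\r', '\n'] = pvSp ['\r', '\n'] i :=
    fun i => pvSplitOn_eq i ['\r', '\n'] (by simp)
  rw [pvSplitOn_eq p.toList [':'] (by simp), pvScanB_eq]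
  simp only [hinner, pvFlat, List.nil_append, pvMapHead_id]
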